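-- pv_equiv track=rewrite | github.com/graceday/DiaphiteCreator | layer_utils.py | verify_layer_sequence
-- ===== SOURCE A (Python) =====
-- from enum import Enum, unique
-- from typing import Iterable, Union
--
-- @unique
-- class LayerTypes(Enum):
--     """
--     Represent each of the 4 different valid layer types.
--     """
--
--     Diamond = (1,)
--     DiamondGraphene = 2
--     Graphene = 3
--     GrapheneDiamond = 4
--
-- def int_seq_to_layertypes(int_seq: Iterable[int]) -> Iterable[LayerTypes]:
--     new_seq = []
--     for item in int_seq:
--         if item == 1:
--             new_seq.append(LayerTypes.Diamond)
--         elif item == 2: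
--             new_seq.append(LayerTypes.DiamondGraphene)
--         elif item == 3:
--             new_seq.append(LayerTypes.Graphene)
--         elif item == 4:
--             new_seq.append(LayerTypes.GrapheneDiamond)
--         else:
--             raise ValueError(f"Invalid layer type to transform, got {item}")
--     return new_seq
--
-- def verify_layer_sequence(sequence: Iterable[Union[LayerTypes, int]]) -> bool:
--     """
--     Verify that a sequence of layers is valid.
--
--     The rules are:
--         - 1s can be followed by 1s or 2s
--         - 2s can be followed by 3s
--         - 3s can be followed by 3s or 4s
--         - 4s can be followed by 1s
--
--     Parameters
--     ----------
--     sequence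
--         An sequence of layer types
--     Returns
--     -------
--     is_valid
--         Does this sequence follow the rules?
--     """
--     if all(isinstance(item, int) for item in sequence):
--         sequence = int_seq_to_layertypes(sequence)
--
--     for idx in range(len(sequence)):
--         next_idx = (idx + 1) % len(sequence)
--         if sequence[idx] == LayerTypes.Diamond:
--             # Diamond must be followed by diamond
--             # or diamond/graphene interace.
--             if sequence[next_idx] not in (
--                 LayerTypes.Diamond,
--                 LayerTypes.DiamondGraphene,
--             ):
--                 return False
--         elif sequence[idx] == LayerTypes.DiamondGraphene:
--             # diamond/graphene interface must be followed by
--             # graphene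
--             if sequence[next_idx] not in (LayerTypes.Graphene,):
--                 return False
--         elif sequence[idx] == LayerTypes.Graphene:
--             # graphene must be followed by graphene or
--             # graphene / diamond interface
--             if sequence[next_idx] not in (
--                 LayerTypes.Graphene,
--                 LayerTypes.GrapheneDiamond,
--             ):
--                 return False
--         elif sequence[idx] == LayerTypes.GrapheneDiamond:
--             if sequence[next_idx] not in (LayerTypes.Diamond,):
--                 return False
--         else:
--             return False
--     return True
-- ===== SOURCE B (Python) =====
-- from enum import Enum, unique
--
-- @unique
-- class LayerTypes(Enum):
--     Diamond = (1,)
--     DiamondGraphene = 2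
--     Graphene = 3
--     GrapheneDiamond = 4
--
-- def int_seq_to_layertypes(int_seq):
--     new_seq = []
--     for item in int_seq:
--         if item == 1:
--             new_seq.append(LayerTypes.Diamond)
--         elif item == 2:
--             new_seq.append(LayerTypes.DiamondGraphene)
--         elif item == 3:
--             new_seq.append(LayerTypes.Graphene)
--         elif item == 4:
--             new_seq.append(LayerTypes.GrapheneDiamond)
--         else:
--             raise ValueError(f"Invalid layer type to transform, got {item}")
--     return new_seq
--
-- # the two layer types that may repeat (self-loop), and the successor in the
-- # only cycle of cross transitions D -> DG -> G -> GD -> D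
-- _SELF = (LayerTypes.Diamond, LayerTypes.Graphene)
-- _SUCC = {LayerTypes.Diamond: LayerTypes.DiamondGraphene,
--          LayerTypes.DiamondGraphene: LayerTypes.Graphene,
--          LayerTypes.Graphene: LayerTypes.GrapheneDiamond,
--          LayerTypes.GrapheneDiamond: LayerTypes.Diamond}
--
-- def _rle(seq):
--     """Run-length encode seq into a list of (symbol, count) runs."""
--     runs = []
--     if seq:
--         cur, cnt = seq[0], 1
--         for x in seq[1:]:
--             if x == cur:
--                 cnt += 1
--             else:
--                 runs.append((cur, cnt))
--                 cur, cnt = x, 1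
--         runs.append((cur, cnt))
--     return runs
--
-- def verify_layer_sequence(sequence):
--     seq = list(sequence)
--     if all(isinstance(item, int) for item in seq):
--         seq = int_seq_to_layertypes(seq)
--     runs = _rle(seq)
--     if not runs:
--         return True
--     lengths_ok = all(cnt == 1 or sym in _SELF for sym, cnt in runs)
--     chain_ok = all(_SUCC[a] == b for (a, _), (b, _) in zip(runs, runs[1:]))
--     first, last = runs[0][0], runs[-1][0]
--     wrap_ok = (first in _SELF) if last == first else (_SUCC[last] == first)
--     return lengths_ok and chain_ok and wrap_ok
-- ===== Notes on version B (the rewrite author's own statement) =====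
-- stated objective: alternative
-- what changed: Instead of A's index/modulo loop checking each cyclic pair against a branch cascade, B run-length-encodes the sequence and validates the compressed runs: only Diamond/Graphene runs may have length > 1, consecutive run symbols must follow the 4-cycle successor D->DG->G->GD->D, plus one wraparound condition between the last and first run.
import Mathlib
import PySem

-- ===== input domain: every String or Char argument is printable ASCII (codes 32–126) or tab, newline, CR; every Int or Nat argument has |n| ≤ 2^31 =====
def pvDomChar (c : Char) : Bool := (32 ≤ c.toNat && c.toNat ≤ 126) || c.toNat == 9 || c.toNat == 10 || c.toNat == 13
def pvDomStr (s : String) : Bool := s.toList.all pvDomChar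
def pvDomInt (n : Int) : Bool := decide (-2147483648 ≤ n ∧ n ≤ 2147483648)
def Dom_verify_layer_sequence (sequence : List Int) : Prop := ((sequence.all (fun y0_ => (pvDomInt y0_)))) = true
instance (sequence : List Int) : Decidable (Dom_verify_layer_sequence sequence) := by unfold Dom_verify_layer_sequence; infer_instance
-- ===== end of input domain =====

-- B replaces A's index/modulo cyclic pair loop by run-length encoding followed by
-- run-level rules (run lengths, successor chain of run symbols, one wrap condition); return value only.

-- ===== PORT A =====
-- the LayerTypes enum
inductive LTy | D | DG | G | GD
deriving DecidableEq

-- int_seq_to_layertypes: none = ValueError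
def toLT? : Int → Option LTy
  | 1 => some LTy.D
  | 2 => some LTy.DG
  | 3 => some LTy.G
  | 4 => some LTy.GD
  | _ => none

def int_seq_to_layertypes : List Int → Option (List LTy)
  | [] => some []
  | x :: xs =>
    match toLT? x with
    | none => none
    | some l => (int_seq_to_layertypes xs).map (l :: ·)

-- one iteration's branch cascade (the final `else: return False` is unreachable on LTy values)
def stepA (cur nxt : LTy) : Bool :=
  match cur with
  | LTy.D => nxt == LTy.D || nxt == LTy.DG
  | LTy.DG => nxt == LTy.G
  | LTy.G => nxt == LTy.G || nxt == LTy.GD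
  | LTy.GD => nxt == LTy.D

-- the `for idx in range(len(sequence))` loop with early return False
def loopA (seq : List LTy) (idx : Nat) : Bool :=
  if idx < seq.length then
    stepA (seq.getD idx LTy.D) (seq.getD ((idx + 1) % seq.length) LTy.D) && loopA seq (idx + 1)
  else
    true
termination_by seq.length - idx

def verify_layer_sequence (sequence : List Int) : Bool :=
  match int_seq_to_layertypes sequence with
  | none => false   -- ValueError: outside Pre_
  | some seq => loopA seq 0

-- ===== PORT B =====
-- _SUCC: the successor in the only cycle of cross transitions
def succL : LTy → LTy
  | LTy.D => LTy.DG
  | LTy.DG => LTy.G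
  | LTy.G => LTy.GD
  | LTy.GD => LTy.D

-- membership in _SELF, the two layer types that may repeat
def selfL : LTy → Bool
  | LTy.D => true
  | LTy.G => true
  | _ => false

-- Source B's _rle loop: fold over seq[1:] with state (runs, cur, cnt)
def rleB (seq : List LTy) : List (LTy × Nat) :=
  match seq with
  | [] => []
  | x :: xs =>
    let st := xs.foldl
      (fun (st : List (LTy × Nat) × LTy × Nat) y =>
        if y = st.2.1 then (st.1, st.2.1, st.2.2 + 1)
        else (st.1 ++ [(st.2.1, st.2.2)], y, 1))
      ([], x, 1)
    st.1 ++ [(st.2.1, st.2.2)]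

-- lengths_ok: all(cnt == 1 or sym in _SELF …)
def lengthsOK (runs : List (LTy × Nat)) : Bool :=
  runs.all (fun r => r.2 == 1 || selfL r.1)

-- chain_ok: all(_SUCC[a] == b for … in zip(runs, runs[1:]))
def chainOK (runs : List (LTy × Nat)) : Bool :=
  (runs.zip (runs.drop 1)).all (fun pq => succL pq.1.1 == pq.2.1)

def verify_layer_sequence_alt (sequence : List Int) : Bool :=
  match int_seq_to_layertypes sequence with
  | none => false   -- ValueError: outside Pre_
  | some seq =>
    match rleB seq with
    | [] => true
    | r0 :: rest =>
      let first := r0.1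
      let last := ((r0 :: rest).getLastD (LTy.D, 0)).1
      lengthsOK (r0 :: rest) && chainOK (r0 :: rest) &&
        (if last == first then selfL first else succL last == first)

-- ===== PRECONDITION & SPEC =====
-- Pre_ excludes exactly the inputs on which A raises ValueError (an element outside 1..4).
def Pre_verify_layer_sequence (sequence : List Int) : Prop :=
  ∀ x ∈ sequence, x = 1 ∨ x = 2 ∨ x = 3 ∨ x = 4
instance (sequence : List Int) : Decidable (Pre_verify_layer_sequence sequence) := by
  unfold Pre_verify_layer_sequence; infer_instance

def pvWitness_verify_layer_sequence : List Int := [1, 2, 3, 4]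

def Spec_verify_layer_sequence (sequence : List Int) (out : Bool) : Prop := out = verify_layer_sequence_alt sequence
instance (sequence : List Int) (out : Bool) : Decidable (Spec_verify_layer_sequence sequence out) := by unfold Spec_verify_layer_sequence; infer_instance

-- ===== CLAIM (what is proved, stated in full; the proofs are below) =====
def Claim_equal_verify_layer_sequence : Prop := ∀ (sequence : List Int), Dom_verify_layer_sequence sequence → Pre_verify_layer_sequence sequence → Spec_verify_layer_sequence sequence (verify_layer_sequence sequence)

-- ===== LEMMAS AND PROOFS =====

-- the Int → LTy map on valid elements
def fLT (x : Int) : LTy :=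
  if x = 1 then LTy.D else if x = 2 then LTy.DG else if x = 3 then LTy.G else LTy.GD

lemma toLayers_of_pre (s : List Int) (h : Pre_verify_layer_sequence s) :
    int_seq_to_layertypes s = some (s.map fLT) := by
  induction s with
  | nil => rfl
  | cons x xs ih =>
    have hx := h x (List.mem_cons_self ..)
    have hxs : Pre_verify_layer_sequence xs := fun y hy => h y (List.mem_cons_of_mem _ hy)
    have := ih hxs
    rcases hx with rfl | rfl | rfl | rfl <;>
      simp [int_seq_to_layertypes, toLT?, this, fLT]

-- loopA unrolled as an `all` over the remaining indices
lemma loopA_eq_range' (seq : List LTy) (idx : Nat) :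
    loopA seq idx =
      (List.range' idx (seq.length - idx)).all
        (fun i => stepA (seq.getD i LTy.D) (seq.getD ((i + 1) % seq.length) LTy.D)) := by
  generalize hk : seq.length - idx = k
  induction k generalizing idx with
  | zero =>
    rw [loopA]
    simp [Nat.not_lt.mpr (Nat.le_of_sub_eq_zero hk)]
  | succ k ih =>
    have hlt : idx < seq.length := by omega
    rw [loopA, if_pos hlt, List.range'_succ]
    have : seq.length - (idx + 1) = k := by omega
    simp [ih _ this]

-- the rotated list's i-th element is seq[(i+1) % n]
lemma rot_getD (s : List LTy) (i : Nat) (hi : i < s.length) :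
    (s.drop 1 ++ s.take 1).getD i LTy.D = s.getD ((i + 1) % s.length) LTy.D := by
  have hn : 0 < s.length := Nat.lt_of_le_of_lt (Nat.zero_le _) hi
  by_cases h : i < s.length - 1
  · have h1 : i < (s.drop 1).length := by simp; omega
    have h2 : (i + 1) % s.length = i + 1 := Nat.mod_eq_of_lt (by omega)
    rw [h2]
    rw [List.getD_eq_getElem _ _ (by simp; omega)]
    rw [List.getElem_append_left h1]
    rw [List.getD_eq_getElem _ _ (by omega)]
    simp
  · have hi' : i = s.length - 1 := by omega
    have h2 : (i + 1) % s.length = 0 := by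
      subst hi'; rw [Nat.sub_add_cancel hn, Nat.mod_self]
    rw [h2]
    rw [List.getD_eq_getElem _ _ (by simp; omega)]
    rw [List.getElem_append_right (by simp; omega)]
    rcases s with _ | ⟨a, t⟩
    · simp at hn
    · simp [hi']

-- A's loop as the cyclic-pair pass over zip(seq, seq[1:] + seq[:1])
lemma loopA_eq_zip (seq : List LTy) :
    loopA seq 0 = (seq.zip (seq.drop 1 ++ seq.take 1)).all (fun p => stepA p.1 p.2) := by
  have hz : seq.zip (seq.drop 1 ++ seq.take 1) =
      (List.range seq.length).map
        (fun i => (seq.getD i LTy.D, seq.getD ((i + 1) % seq.length) LTy.D)) := by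
    apply List.ext_getElem
    · rcases seq with _ | ⟨a, t⟩ <;> simp
    · intro i h1 h2
      have hi : i < seq.length := by simpa using h2
      rw [List.getElem_zip]
      simp only [List.getElem_map, List.getElem_range, Prod.mk.injEq]
      refine ⟨?_, ?_⟩
      · rw [List.getD_eq_getElem _ _ hi]
      · rw [← rot_getD seq i hi]
        exact (List.getD_eq_getElem _ _ (by
          rcases seq with _ | ⟨a, t⟩
          · simp at hi
          · simp at hi ⊢; omega)).symm
  rw [loopA_eq_range' seq 0, hz, List.all_map]
  simp [← List.range_eq_range']
  rfl

-- linear chain of stepA along cur :: ys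
def chainB : LTy → List LTy → Bool
  | _, [] => true
  | c, y :: ys => stepA c y && chainB y ys

-- the cyclic zip splits into the linear zip plus the wrap pair
lemma zip_rot_cons (x a : LTy) (xs : List LTy) :
    (x :: xs).zip (xs ++ [a]) = (x :: xs).zip xs ++ [(xs.getLastD x, a)] := by
  induction xs generalizing x with
  | nil => rfl
  | cons y ys ih =>
    rw [List.getLastD_cons]
    simp [List.zip_cons_cons, ih y]

lemma zip_adj_eq_chainB (x : LTy) (xs : List LTy) :
    ((x :: xs).zip xs).all (fun p => stepA p.1 p.2) = chainB x xs := by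
  induction xs generalizing x with
  | nil => rfl
  | cons y ys ih => simp [List.zip_cons_cons, chainB, ih y]

-- stepA written with selfL / succL
lemma stepA_eq_if (a b : LTy) :
    stepA a b = if a == b then selfL b else succL a == b := by
  cases a <;> cases b <;> decide

-- structural left recursion equivalent to Source B's _rle loop
def rleGo (cur : LTy) (cnt : Nat) : List LTy → List (LTy × Nat)
  | [] => [(cur, cnt)]
  | y :: ys => if y = cur then rleGo cur (cnt + 1) ys else (cur, cnt) :: rleGo y 1 ys

-- the loop body of _rle, named for the proofs (definitionally the lambda in rleB)
def rleStep (st : List (LTy × Nat) × LTy × Nat) (y : LTy) : List (LTy × Nat) × LTy × Nat :=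
  if y = st.2.1 then (st.1, st.2.1, st.2.2 + 1) else (st.1 ++ [(st.2.1, st.2.2)], y, 1)

lemma rleB_foldl (ys : List LTy) (cur : LTy) (cnt : Nat) (runs : List (LTy × Nat)) :
    (ys.foldl rleStep (runs, cur, cnt)).1
      ++ [((ys.foldl rleStep (runs, cur, cnt)).2.1, (ys.foldl rleStep (runs, cur, cnt)).2.2)]
      = runs ++ rleGo cur cnt ys := by
  induction ys generalizing runs cur cnt with
  | nil => simp [rleGo]
  | cons y ys ih =>
    by_cases hy : y = cur
    · rw [List.foldl_cons,
        show rleStep (runs, cur, cnt) y = (runs, cur, cnt + 1) from by simp [rleStep, hy],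
        ih]
      simp [rleGo, hy]
    · rw [List.foldl_cons,
        show rleStep (runs, cur, cnt) y = (runs ++ [(cur, cnt)], y, 1) from by
          simp [rleStep, hy],
        ih]
      simp [rleGo, hy]

lemma rleB_eq_go (x : LTy) (xs : List LTy) : rleB (x :: xs) = rleGo x 1 xs := by
  have h := rleB_foldl xs x 1 []
  simpa [rleB, rleStep] using h

lemma rleGo_head (ys : List LTy) (cur : LTy) (cnt : Nat) :
    ∃ k rest, rleGo cur cnt ys = (cur, k) :: rest := by
  induction ys generalizing cur cnt with
  | nil => exact ⟨cnt, [], rfl⟩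
  | cons y ys ih =>
    by_cases hy : y = cur
    · simpa [rleGo, hy] using ih cur (cnt + 1)
    · exact ⟨cnt, rleGo y 1 ys, by simp [rleGo, hy]⟩

lemma rleGo_last (ys : List LTy) (cur : LTy) (cnt : Nat) (d : LTy × Nat) :
    ((rleGo cur cnt ys).getLastD d).1 = ys.getLastD cur := by
  induction ys generalizing cur cnt d with
  | nil => rfl
  | cons y ys ih =>
    rw [List.getLastD_cons]
    by_cases hy : y = cur
    · subst hy
      rw [rleGo, if_pos rfl]
      exact ih y (cnt + 1) d
    · rw [rleGo, if_neg hy]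
      obtain ⟨k, rest, hk⟩ := rleGo_head ys y 1
      rw [hk, List.getLastD_cons, ← hk]
      exact ih y 1 (cur, cnt)

-- main invariant: run-level checks equal the linear stepA chain (plus the head-run length rule)
lemma runs_eq_chain (ys : List LTy) (cur : LTy) (cnt : Nat) (h : 1 ≤ cnt) :
    (lengthsOK (rleGo cur cnt ys) && chainOK (rleGo cur cnt ys))
      = ((cnt == 1 || selfL cur) && chainB cur ys) := by
  induction ys generalizing cur cnt with
  | nil => simp [rleGo, lengthsOK, chainOK, chainB]
  | cons y ys ih =>
    by_cases hy : y = cur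
    · subst hy
      rw [rleGo, if_pos rfl, ih _ _ (by omega)]
      have hc1 : (cnt + 1 == 1) = false := by simp; omega
      have hs : stepA y y = selfL y := by cases y <;> decide
      simp only [chainB, hs, hc1, Bool.false_or]
      cases selfL y <;> cases chainB y ys <;> cases (cnt == 1) <;> simp
    · obtain ⟨k, rest, hk⟩ := rleGo_head ys y 1
      rw [rleGo, if_neg hy]
      have hchain : chainOK ((cur, cnt) :: rleGo y 1 ys)
          = ((succL cur == y) && chainOK (rleGo y 1 ys)) := by
        rw [hk]; simp [chainOK, List.zip_cons_cons]
      have hlen : lengthsOK ((cur, cnt) :: rleGo y 1 ys)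
          = ((cnt == 1 || selfL cur) && lengthsOK (rleGo y 1 ys)) := by
        simp [lengthsOK]
      have hcy : (cur == y) = false := by
        simpa using fun h' => hy h'.symm
      have hstep : stepA cur y = (succL cur == y) := by
        simp [stepA_eq_if, hcy]
      have ihy : (lengthsOK (rleGo y 1 ys) && chainOK (rleGo y 1 ys)) = chainB y ys := by
        simpa using ih y 1 le_rfl
      rw [hchain, hlen, chainB, hstep, ← ihy]
      cases (cnt == 1 || selfL cur) <;> cases lengthsOK (rleGo y 1 ys) <;>
        cases chainOK (rleGo y 1 ys) <;> cases (succL cur == y) <;> simp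

-- ===== VERDICT (by name: the statement is the Claim_ definition above) =====
theorem verify_layer_sequence_spec : Claim_equal_verify_layer_sequence := by
  intro s _ hpre
  unfold Spec_verify_layer_sequence verify_layer_sequence verify_layer_sequence_alt
  rw [toLayers_of_pre s hpre]
  simp only
  rcases hseq : s.map fLT with _ | ⟨x, xs⟩
  · simp [rleB, loopA]
  · rw [loopA_eq_zip, rleB_eq_go]
    obtain ⟨k, rest, hk⟩ := rleGo_head xs x 1
    rw [hk]
    simp only
    rw [← hk, rleGo_last, runs_eq_chain xs x 1 le_rfl]
    rw [show (List.take 1 (x :: xs)) = [x] from rfl, show (List.drop 1 (x :: xs)) = xs from rfl,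
      zip_rot_cons, List.all_append, zip_adj_eq_chainB]
    simp only [List.all_cons, List.all_nil, Bool.and_true, stepA_eq_if]
    simp
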